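-- pv_equiv track=rewrite | github.com/keema383/Quoridor_Strategic_Game | src/main.py | is_wall_blocking_move
-- ===== SOURCE A (Python) =====
-- HORIZONTAL = 'H'
--
-- VERTICAL = 'V'
--
-- def is_wall_blocking_move(position, move, walls):
--     """
--     Check if a wall is blocking the move.
--
--     Parameters:
--     - position: (x, y) - current position of the player.
--     - move: (move_x, move_y) - target position after the move.
--     - walls: List of walls with each wall as (x, y, orientation).
--
--     Returns:
--     - True if a wall blocks the move, False otherwise.
--     """
--     x, y = position
--     move_x, move_y = move
--
--     # Check for horizontal walls blocking upward or downward movement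
--     if move_y < y:  # Moving up
--         for wall_x, wall_y, orientation in walls:
--             if orientation == HORIZONTAL and wall_y == y and (wall_x == x or wall_x == x - 1):
--                 return True
--     if move_y > y:  # Moving down
--         for wall_x, wall_y, orientation in walls:
--             if orientation == HORIZONTAL and wall_y == y + 1 and (wall_x == x or wall_x == x - 1):
--                 return True
--
--     # Check for vertical walls blocking left or right movement
--     if move_x < x:  # Moving left
--         for wall_x, wall_y, orientation in walls:
--             if orientation == VERTICAL and wall_x == x and (wall_y == y or wall_y == y - 1):
--                 return True
--     if move_x > x:  # Moving right
--         for wall_x, wall_y, orientation in walls: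
--             if orientation == VERTICAL and wall_x == x + 1 and (wall_y == y or wall_y == y - 1):
--                 return True
--
--     return False
-- ===== SOURCE B (Python) =====
-- HORIZONTAL = 'H'
-- VERTICAL = 'V'
--
-- def is_wall_blocking_move(position, move, walls):
--     # Inverted approach: enumerate the concrete wall tuples that would block
--     # this move, then test membership in a set of the placed walls.
--     x, y = position
--     move_x, move_y = move
--     candidates = []
--     if move_y < y:
--         candidates += [(x, y, HORIZONTAL), (x - 1, y, HORIZONTAL)]
--     if move_y > y:
--         candidates += [(x, y + 1, HORIZONTAL), (x - 1, y + 1, HORIZONTAL)]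
--     if move_x < x:
--         candidates += [(x, y, VERTICAL), (x, y - 1, VERTICAL)]
--     if move_x > x:
--         candidates += [(x + 1, y, VERTICAL), (x + 1, y - 1, VERTICAL)]
--     wall_set = set(walls)
--     return any(c in wall_set for c in candidates)
-- ===== Notes on version B (the rewrite author's own statement) =====
-- stated objective: alternative
-- what changed: Inverts the algorithm: instead of scanning the wall list with direction-dependent predicates, B enumerates the at-most-8 concrete wall tuples that could block this particular move and tests each for membership in a set built from the walls.
import Mathlib
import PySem

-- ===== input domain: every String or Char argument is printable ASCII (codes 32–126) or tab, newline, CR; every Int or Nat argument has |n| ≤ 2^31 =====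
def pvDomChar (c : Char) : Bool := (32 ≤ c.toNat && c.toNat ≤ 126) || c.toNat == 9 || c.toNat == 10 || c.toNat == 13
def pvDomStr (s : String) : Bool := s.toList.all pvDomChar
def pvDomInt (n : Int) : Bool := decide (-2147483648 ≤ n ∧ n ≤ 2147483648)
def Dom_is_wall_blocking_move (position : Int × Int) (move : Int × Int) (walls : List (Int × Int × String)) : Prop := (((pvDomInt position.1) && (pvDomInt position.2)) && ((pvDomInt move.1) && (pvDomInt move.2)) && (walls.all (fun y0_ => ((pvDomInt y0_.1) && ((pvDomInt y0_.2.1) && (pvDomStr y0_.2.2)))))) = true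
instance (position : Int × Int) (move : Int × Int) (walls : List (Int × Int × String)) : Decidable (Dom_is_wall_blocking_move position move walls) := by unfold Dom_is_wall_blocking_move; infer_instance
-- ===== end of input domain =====

-- B inverts the algorithm: it enumerates the at-most-8 candidate wall tuples that could block the move and tests membership in a set of the walls, instead of scanning walls with direction predicates (objective: alternative).


-- ===== PORT A =====
-- literal port of A: four direction-guarded scans over the wall list, in A's order
def is_wall_blocking_move (position : Int × Int) (move : Int × Int) (walls : List (Int × Int × String)) : Bool :=
  let x := position.1; let y := position.2
  let move_x := move.1; let move_y := move.2
  (decide (move_y < y) && walls.any (fun w =>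
     w.2.2 == "H" && w.2.1 == y && (w.1 == x || w.1 == x - 1))) ||
  (decide (move_y > y) && walls.any (fun w =>
     w.2.2 == "H" && w.2.1 == y + 1 && (w.1 == x || w.1 == x - 1))) ||
  (decide (move_x < x) && walls.any (fun w =>
     w.2.2 == "V" && w.1 == x && (w.2.1 == y || w.2.1 == y - 1))) ||
  (decide (move_x > x) && walls.any (fun w =>
     w.2.2 == "V" && w.1 == x + 1 && (w.2.1 == y || w.2.1 == y - 1)))

-- ===== PORT B =====
-- port of B: build the candidate list of blocking wall tuples, then test set membership
def is_wall_blocking_move_alt (position : Int × Int) (move : Int × Int) (walls : List (Int × Int × String)) : Bool :=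
  let x := position.1; let y := position.2
  let move_x := move.1; let move_y := move.2
  let candidates : List (Int × Int × String) :=
    (if move_y < y then [(x, y, "H"), (x - 1, y, "H")] else []) ++
    (if move_y > y then [(x, y + 1, "H"), (x - 1, y + 1, "H")] else []) ++
    (if move_x < x then [(x, y, "V"), (x, y - 1, "V")] else []) ++
    (if move_x > x then [(x + 1, y, "V"), (x + 1, y - 1, "V")] else [])
  let wall_set := PySem.Set.ofList walls
  candidates.any (fun c => PySem.Set.contains wall_set c)

-- ===== PRECONDITION & SPEC =====
def Spec_is_wall_blocking_move (position : Int × Int) (move : Int × Int) (walls : List (Int × Int × String)) (out : Bool) : Prop := out = is_wall_blocking_move_alt position move walls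
instance (position : Int × Int) (move : Int × Int) (walls : List (Int × Int × String)) (out : Bool) : Decidable (Spec_is_wall_blocking_move position move walls out) := by unfold Spec_is_wall_blocking_move; infer_instance

-- ===== CLAIM (what is proved, stated in full; the proofs are below) =====
def Claim_equal_is_wall_blocking_move : Prop := ∀ (position : Int × Int) (move : Int × Int) (walls : List (Int × Int × String)), Dom_is_wall_blocking_move position move walls → Spec_is_wall_blocking_move position move walls (is_wall_blocking_move position move walls)

-- ===== LEMMAS AND PROOFS =====

-- any over a conditionally-included candidate block
theorem any_ite_nil {α : Type} {c : Prop} [Decidable c] (l : List α) (p : α → Bool) :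
    (if c then l else []).any p = (decide c && l.any p) := by
  split <;> simp_all

-- membership in the set built from walls is membership in walls
theorem contains_ofList_walls (walls : List (Int × Int × String)) (c : Int × Int × String) :
    PySem.Set.contains (PySem.Set.ofList walls) c = walls.contains c := by
  simp [PySem.Set.mem_ofList]

-- A's horizontal-clause scan equals membership of the two H candidates
theorem anyH_eq (walls : List (Int × Int × String)) (a b : Int) :
    walls.any (fun w => w.2.2 == "H" && w.2.1 == b && (w.1 == a || w.1 == a - 1)) =
      (walls.contains (a, b, "H") || walls.contains (a - 1, b, "H")) := by
  induction walls with
  | nil => simp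
  | cons w rest ih =>
    obtain ⟨wx, wy, o⟩ := w
    simp only [List.any_cons, List.contains_cons, ih]
    rw [Bool.eq_iff_iff]
    simp only [Bool.or_eq_true, Bool.and_eq_true, beq_iff_eq, Prod.mk.injEq]
    constructor <;> intro h <;> rcases h with h | h <;> tauto

-- A's vertical-clause scan equals membership of the two V candidates
theorem anyV_eq (walls : List (Int × Int × String)) (a b : Int) :
    walls.any (fun w => w.2.2 == "V" && w.1 == a && (w.2.1 == b || w.2.1 == b - 1)) =
      (walls.contains (a, b, "V") || walls.contains (a, b - 1, "V")) := by
  induction walls with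
  | nil => simp
  | cons w rest ih =>
    obtain ⟨wx, wy, o⟩ := w
    simp only [List.any_cons, List.contains_cons, ih]
    rw [Bool.eq_iff_iff]
    simp only [Bool.or_eq_true, Bool.and_eq_true, beq_iff_eq, Prod.mk.injEq]
    constructor <;> intro h <;> rcases h with h | h <;> tauto

-- ===== VERDICT (by name: the statement is the Claim_ definition above) =====
theorem is_wall_blocking_move_spec : Claim_equal_is_wall_blocking_move := by
  intro position move walls _
  unfold Spec_is_wall_blocking_move is_wall_blocking_move is_wall_blocking_move_alt
  simp only [List.any_append, any_ite_nil, List.any_cons, List.any_nil,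
    contains_ofList_walls, anyH_eq, anyV_eq, Bool.or_false]
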